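-- pv_equiv track=rewrite | github.com/colinyaos/Testbed_Repo | beads.py | evaluate
-- ===== SOURCE A (Python) =====
-- def evaluate(stringIn):
--     """stringIn represents a necklace that has already been broken.
--     We read from the beginning to the right, and then from the end to the left.
--     Returns int, which is number of beads which can be legally taken."""
--
--     numBeads = 0
--     startColor = "w"
--     endColor = "w"
--
--     sameColor = True
--
--     while sameColor:
--         for char in stringIn:
--             if startColor == "w":
--                 startColor = char
--
--             if char == "w":
--                 numBeads += 1
--             elif startColor == char:
--                 numBeads += 1
--             else:
--                 sameColor = False
--                 break
--         break
--
--     sameColor = True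
--
--     stringBack = stringIn[numBeads:][::-1]
--     while sameColor:
--         for char in stringBack:
--             if endColor == "w":
--                 endColor = char
--
--             if char == "w":
--                 numBeads += 1
--             elif endColor == char:
--                 numBeads += 1
--             else:
--                 sameColor = False
--                 break
--         break
--     return numBeads
-- ===== SOURCE B (Python) =====
-- def evaluate(stringIn):
--     n = len(stringIn)
--     nw = [(i, c) for i, c in enumerate(stringIn) if c != 'w']
--     if not nw:
--         return n
--     c0 = nw[0][1]
--     cl = nw[-1][1]
--     f = next((i for i, c in nw if c != c0), n)
--     b = next((n - 1 - i for i, c in reversed(nw) if c != cl), n)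
--     return min(f + b, n)
-- ===== Notes on version B (the rewrite author's own statement) =====
-- stated objective: alternative
-- what changed: A walks the characters twice with a stateful colour/counter scan, slicing off the consumed front and rescanning its reversal; B instead builds the list of (index, colour) pairs of the non-white beads once, reads both takeable runs as pure index lookups in that list (first conflicting colour from each end), and clamps their sum by the length.
import Mathlib
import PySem

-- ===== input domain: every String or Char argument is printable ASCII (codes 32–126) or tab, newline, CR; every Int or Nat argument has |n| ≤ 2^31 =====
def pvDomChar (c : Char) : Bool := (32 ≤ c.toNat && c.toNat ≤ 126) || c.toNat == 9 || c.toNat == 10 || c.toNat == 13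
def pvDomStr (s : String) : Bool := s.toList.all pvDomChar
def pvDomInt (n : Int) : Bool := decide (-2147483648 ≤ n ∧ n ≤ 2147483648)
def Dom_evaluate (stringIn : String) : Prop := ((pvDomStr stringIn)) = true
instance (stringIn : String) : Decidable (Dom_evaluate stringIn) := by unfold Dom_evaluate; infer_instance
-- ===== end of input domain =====

-- B replaces A's stateful consume-front / slice / rescan character loops by one pass that
-- collects the positions of the non-white beads, after which both ends are pure index
-- lookups in that list, combined by min with the length (alternative decomposition).

-- ===== PORT A =====
-- A's for-loop with break, state (startColor/endColor, numBeads); the 'while sameColor: … break'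
-- wrapper executes the for-loop exactly once, so it is ported as the loop itself.
def pvScanA : List Char → Char → Int → Int
  | [], _, n => n
  | c :: rest, color0, n =>
    let color := if color0 == 'w' then c else color0
    if c == 'w' then pvScanA rest color (n + 1)
    else if color == c then pvScanA rest color (n + 1)
    else n

def evaluate (stringIn : String) : Int :=
  let l := stringIn.toList
  let numBeads := pvScanA l 'w' 0
  -- stringIn[numBeads:] is PySem.List.slice, and [::-1] is reverse
  let stringBack := (PySem.List.slice l (some numBeads) none).reverse
  pvScanA stringBack 'w' numBeads

-- ===== PORT B =====
-- Source B: nw = [(i, c) for i, c in enumerate(stringIn) if c != 'w']; then pure lookups in nw.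
def evaluate_alt (stringIn : String) : Int :=
  let l := stringIn.toList
  let n : Int := l.length
  let nw := (PySem.List.enumerate l).filter (fun p => p.2 != 'w')
  match nw with
  | [] => n
  | p0 :: t =>
    let c0 := p0.2
    let cl := ((p0 :: t).getLast?.getD p0).2
    -- f = next((i for i, c in nw if c != c0), n)
    let f := match (p0 :: t).find? (fun p => p.2 != c0) with
      | some p => p.1
      | none => n
    -- b = next((n - 1 - i for i, c in reversed(nw) if c != cl), n)
    let b := match (p0 :: t).reverse.find? (fun p => p.2 != cl) with
      | some p => n - 1 - p.1
      | none => n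
    min (f + b) n

-- ===== PRECONDITION & SPEC =====
def Spec_evaluate (stringIn : String) (out : Int) : Prop := out = evaluate_alt stringIn
instance (stringIn : String) (out : Int) : Decidable (Spec_evaluate stringIn out) := by unfold Spec_evaluate; infer_instance

-- ===== CLAIM (what is proved, stated in full; the proofs are below) =====
def Claim_equal_evaluate : Prop := ∀ (stringIn : String), Dom_evaluate stringIn → Spec_evaluate stringIn (evaluate stringIn)

-- ===== LEMMAS AND PROOFS =====

-- pure count of takeable beads: the Nat value A's scan accumulates
def pvCnt : List Char → Option Char → Nat
  | [], _ => 0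
  | c :: rest, color =>
    if c == 'w' then 1 + pvCnt rest color
    else match color with
      | none => 1 + pvCnt rest (some c)
      | some k => if c == k then 1 + pvCnt rest (some k) else 0

-- first index in an option of pairs, with a default
def pvF (o : Option (Int × Char)) (d : Int) : Int :=
  match o with
  | some p => p.1
  | none => d

-- B's forward computation over a non-white enumeration, with a default
def pvFwd (nw : List (Int × Char)) (d : Int) : Int :=
  match nw with
  | [] => d
  | p0 :: t => pvF ((p0 :: t).find? (fun p => p.2 != p0.2)) d

theorem pvScanA_cnt (l : List Char) :
    (∀ n : Int, pvScanA l 'w' n = n + (pvCnt l none : Int)) ∧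
    (∀ (n : Int) (k : Char), k ≠ 'w' → pvScanA l k n = n + (pvCnt l (some k) : Int)) := by
  induction l with
  | nil => constructor <;> intros <;> simp [pvScanA, pvCnt]
  | cons c rest ih =>
    constructor
    · intro n
      by_cases hw : c = 'w'
      · subst hw
        rw [show pvScanA ('w' :: rest) 'w' n = pvScanA rest 'w' (n + 1) from by
          simp [pvScanA], ih.1 (n + 1)]
        simp [pvCnt]; ring
      · rw [show pvScanA (c :: rest) 'w' n = pvScanA rest c (n + 1) from by
          simp [pvScanA, hw], ih.2 (n + 1) c hw]
        simp [pvCnt, hw]; ring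
    · intro n k hk
      by_cases hw : c = 'w'
      · subst hw
        rw [show pvScanA ('w' :: rest) k n = pvScanA rest k (n + 1) from by
          simp [pvScanA, hk], ih.2 (n + 1) k hk]
        simp [pvCnt]; ring
      · by_cases hck : c = k
        · subst hck
          rw [show pvScanA (c :: rest) c n = pvScanA rest c (n + 1) from by
            simp [pvScanA, hw], ih.2 (n + 1) c hk]
          simp [pvCnt, hw]; ring
        · have hkc : ¬ k = c := fun h => hck h.symm
          simp [pvScanA, pvCnt, hw, hck, hkc, hk]

theorem pvCnt_le_length (l : List Char) : ∀ o : Option Char, pvCnt l o ≤ l.length := by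
  induction l with
  | nil => intro o; simp [pvCnt]
  | cons c rest ih =>
    intro o
    by_cases hw : c == 'w'
    · have := ih o; simp [pvCnt, hw]; omega
    · cases o with
      | none => have := ih (some c); simp [pvCnt, hw]; omega
      | some k =>
        by_cases hk : c == k
        · have := ih (some k); simp [pvCnt, hw, hk]; omega
        · simp [pvCnt, hw, hk]

-- the count is prefix-determined: on a truncation it is the clamped count
theorem pvCnt_take (l : List Char) : ∀ (m : Nat) (o : Option Char),
    pvCnt (l.take m) o = min (pvCnt l o) m := by
  induction l with
  | nil => intro m o; simp [pvCnt]
  | cons c rest ih =>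
    intro m o
    cases m with
    | zero => simp [pvCnt]
    | succ m' =>
      by_cases hw : c == 'w'
      · simp [pvCnt, hw, ih]; omega
      · cases o with
        | none => simp [pvCnt, hw, ih]; omega
        | some k =>
          by_cases hk : c == k
          · simp [pvCnt, hw, hk, ih]; omega
          · simp [pvCnt, hw, hk]

-- A, in closed min form: front count plus back count clamped by the length
theorem evaluate_eq_min (s : String) :
    evaluate s = min ((pvCnt s.toList none : Int) + (pvCnt s.toList.reverse none : Int))
      (s.toList.length : Int) := by
  have hfle := pvCnt_le_length s.toList none
  have hbrev := pvCnt_le_length s.toList.reverse none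
  unfold evaluate
  simp only [(pvScanA_cnt _).1, zero_add, PySem.List.slice_from_natCast,
    List.reverse_drop, pvCnt_take]
  push_cast
  omega

-- pvCnt with a fixed colour, through the filtered enumeration
theorem pvCnt_some_enum (l : List Char) : ∀ (s : Int) (k : Char),
    s + (pvCnt l (some k) : Int) =
      pvF (((PySem.List.enumerate l s).filter (fun p => p.2 != 'w')).find?
          (fun p => p.2 != k)) (s + l.length) := by
  induction l with
  | nil => intro s k; simp [pvCnt, PySem.List.enumerate, pvF]
  | cons c rest ih =>
    intro s k
    rw [PySem.List.enumerate_cons, List.length_cons]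
    rw [show s + ((rest.length + 1 : Nat) : Int) = (s + 1) + (rest.length : Int) by push_cast; ring]
    by_cases hw : c = 'w'
    · subst hw
      rw [List.filter_cons_of_neg (by simp), ← ih (s + 1) k]
      simp [pvCnt]; ring
    · by_cases hck : c = k
      · subst hck
        rw [List.filter_cons_of_pos (by simp [hw]), List.find?_cons_of_neg (by simp),
          ← ih (s + 1) c]
        simp [pvCnt, hw]; ring
      · rw [List.filter_cons_of_pos (by simp [hw]), List.find?_cons_of_pos (by simp [hck])]
        simp [pvCnt, hw, hck, pvF]

-- pvCnt from a blank colour, through the filtered enumeration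
theorem pvCnt_none_enum (l : List Char) : ∀ (s : Int),
    s + (pvCnt l none : Int) =
      pvFwd ((PySem.List.enumerate l s).filter (fun p => p.2 != 'w')) (s + l.length) := by
  induction l with
  | nil => intro s; simp [pvCnt, PySem.List.enumerate, pvFwd]
  | cons c rest ih =>
    intro s
    rw [PySem.List.enumerate_cons, List.length_cons]
    rw [show s + ((rest.length + 1 : Nat) : Int) = (s + 1) + (rest.length : Int) by push_cast; ring]
    by_cases hw : c = 'w'
    · subst hw
      rw [List.filter_cons_of_neg (by simp), ← ih (s + 1)]
      simp [pvCnt]; ring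
    · rw [List.filter_cons_of_pos (by simp [hw])]
      have hx := pvCnt_some_enum rest (s + 1) c
      simp only [pvFwd]
      rw [List.find?_cons_of_neg (by simp), ← hx]
      simp [pvCnt, hw]; ring

-- enumerate shifts the start by mapping over the indices
theorem enumerate_shift (l : List Char) : ∀ (s t : Int),
    PySem.List.enumerate l (s + t) = (PySem.List.enumerate l t).map (fun p => (p.1 + s, p.2)) := by
  induction l with
  | nil => intro s t; simp [PySem.List.enumerate]
  | cons c rest ih =>
    intro s t
    rw [PySem.List.enumerate_cons, PySem.List.enumerate_cons, List.map_cons]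
    have h : s + t + 1 = s + (t + 1) := by ring
    rw [h, ih s (t + 1)]
    simp [add_comm s t]

-- enumerating the reversal = reversing the enumeration with indices flipped
theorem enumerate_reverse (l : List Char) :
    PySem.List.enumerate l.reverse =
      ((PySem.List.enumerate l).map
        (fun p => ((l.length : Int) - 1 - p.1, p.2))).reverse := by
  induction l with
  | nil => simp [PySem.List.enumerate]
  | cons c rest ih =>
    rw [List.reverse_cons, PySem.List.enumerate_append, ih]
    have h2 : PySem.List.enumerate rest ((1 : Int) + 0) =
        (PySem.List.enumerate rest 0).map (fun p => (p.1 + 1, p.2)) :=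
      enumerate_shift rest 1 0
    simp only [PySem.List.enumerate_cons, PySem.List.enumerate_nil, List.length_reverse,
      zero_add, List.map_cons, List.reverse_cons, List.length_cons]
    rw [show (1 : Int) = (1 : Int) + 0 from by ring, h2, List.map_map]
    congr 1
    · congr 1
      congr 1
      funext p
      simp only [Function.comp_apply, Prod.mk.injEq]
      refine ⟨by push_cast; ring, trivial⟩
    · congr 2
      push_cast; ring

-- the non-white enumeration of the reversal, in terms of that of l
theorem nw_reverse (l : List Char) :
    (PySem.List.enumerate l.reverse).filter (fun p => p.2 != 'w') =
      (((PySem.List.enumerate l).filter (fun p => p.2 != 'w')).reverse).map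
        (fun p => ((l.length : Int) - 1 - p.1, p.2)) := by
  rw [enumerate_reverse, List.filter_reverse, List.filter_map]
  have h : ((fun p : Int × Char => p.2 != 'w') ∘
      (fun p : Int × Char => ((l.length : Int) - 1 - p.1, p.2))) =
      (fun p : Int × Char => p.2 != 'w') := rfl
  rw [h, List.map_reverse]

-- B's forward computation on an index-flipped list pulls the flip out
theorem pvFwd_map (q0 : Int × Char) (r : List (Int × Char)) (n : Int) :
    pvFwd ((q0 :: r).map (fun p => (n - 1 - p.1, p.2))) n =
      match (q0 :: r).find? (fun p => p.2 != q0.2) with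
      | some p => n - 1 - p.1
      | none => n := by
  show pvF (((q0 :: r).map (fun p : Int × Char => (n - 1 - p.1, p.2))).find?
      (fun p => p.2 != q0.2)) n = _
  rw [List.find?_map]
  have h : ((fun p : Int × Char => p.2 != q0.2) ∘
      (fun p : Int × Char => (n - 1 - p.1, p.2))) = (fun p : Int × Char => p.2 != q0.2) := rfl
  rw [h]
  cases hq : (q0 :: r).find? (fun p => p.2 != q0.2) <;> simp [pvF]

theorem evaluate_eq_alt (s : String) : evaluate s = evaluate_alt s := by
  rw [evaluate_eq_min]
  have hf := pvCnt_none_enum s.toList 0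
  have hb := pvCnt_none_enum s.toList.reverse 0
  rw [nw_reverse] at hb
  simp only [zero_add, List.length_reverse] at hf hb
  simp only [evaluate_alt]
  cases hnw : (PySem.List.enumerate s.toList).filter (fun p => p.2 != 'w') with
  | nil =>
    rw [hnw] at hf hb
    simp only [List.reverse_nil, List.map_nil, pvFwd] at hf hb
    show min ((pvCnt s.toList none : Int) + (pvCnt s.toList.reverse none : Int))
      (s.toList.length : Int) = (s.toList.length : Int)
    rw [hf, hb]
    have h0 : (0:Int) ≤ (s.toList.length : Int) := Int.natCast_nonneg _
    omega
  | cons p0 t =>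
    rw [hnw] at hf hb
    cases hrev : (p0 :: t).reverse with
    | nil => exact absurd (congrArg List.length hrev) (by simp)
    | cons q0 rr =>
      rw [hrev, pvFwd_map] at hb
      have hcl : (p0 :: t).getLast?.getD p0 = q0 := by
        rw [List.getLast?_eq_head?_reverse, hrev]; rfl
      simp only [hrev, hcl]
      rw [hf, hb]
      cases hq1 : (p0 :: t).find? (fun p => p.2 != p0.2) <;>
        cases hq2 : (q0 :: rr).find? (fun p => p.2 != q0.2) <;>
        (simp only [pvFwd, pvF, hq1]; try simp only [hq2])

-- ===== VERDICT (by name: the statement is the Claim_ definition above) =====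
theorem evaluate_spec : Claim_equal_evaluate := by
  intro s _
  unfold Spec_evaluate
  exact evaluate_eq_alt s
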